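-- pv_equiv track=rewrite | github.com/pkucs-Ltf/RealTraffic | tool/Carttils.py | transform_pointlist
-- ===== SOURCE A (Python) =====
-- def transform_pointlist(list,front_n):
--     count=0
--     newlist=[]
--     calculator=0
--     for i in list:
--         calculator+=1
--         if i!=0 and count<=front_n:
--             newlist.append(1)
--             count += 1
--         else:
--             newlist.append(0)
--     return  newlist
-- ===== SOURCE B (Python) =====
-- def transform_pointlist(list, front_n):
--     positions = [idx for idx, v in enumerate(list) if v != 0]
--     keep = set(positions[:max(front_n + 1, 0)])
--     return [1 if idx in keep else 0 for idx in range(len(list))]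
-- ===== Notes on version B (the rewrite author's own statement) =====
-- stated objective: alternative
-- what changed: Replaced the single stateful counter loop with a two-pass formulation: collect the indices of nonzero elements, keep the first max(front_n+1,0) of them as a set, and emit 1/0 by membership over range(len(list)).
import Mathlib
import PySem

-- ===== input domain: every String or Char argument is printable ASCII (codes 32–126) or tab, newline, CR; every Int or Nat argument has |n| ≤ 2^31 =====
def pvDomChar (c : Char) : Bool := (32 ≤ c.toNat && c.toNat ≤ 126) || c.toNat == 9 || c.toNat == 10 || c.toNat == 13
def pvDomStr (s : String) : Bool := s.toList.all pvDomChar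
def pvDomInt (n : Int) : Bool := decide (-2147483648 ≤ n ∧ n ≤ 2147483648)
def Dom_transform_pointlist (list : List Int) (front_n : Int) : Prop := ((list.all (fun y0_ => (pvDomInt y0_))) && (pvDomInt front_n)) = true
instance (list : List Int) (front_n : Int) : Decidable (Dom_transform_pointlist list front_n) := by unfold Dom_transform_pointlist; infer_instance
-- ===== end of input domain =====

-- B replaces A's stateful counter loop by a two-pass formulation (nonzero index list, then membership); alternative decomposition, same cost.

-- ===== PORT A =====
def transform_pointlist (list : List Int) (front_n : Int) : List Int :=
  (list.foldl (fun (s : Int × List Int × Int) i =>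
      let calculator := s.2.2 + 1
      if i ≠ 0 ∧ s.1 ≤ front_n then (s.1 + 1, s.2.1 ++ [(1 : Int)], calculator)
      else (s.1, s.2.1 ++ [(0 : Int)], calculator))
    ((0 : Int), ([] : List Int), (0 : Int))).2.1

-- ===== PORT B =====
def transform_pointlist_alt (list : List Int) (front_n : Int) : List Int :=
  let positions : List Int :=
    ((PySem.List.enumerate list 0).filter (fun p => p.2 != 0)).map (fun p => p.1)
  let keep : PySem.Set Int :=
    PySem.Set.ofList (PySem.List.slice positions none (some (max (front_n + 1) 0)))
  (PySem.List.pyRange 0 (list.length : Int) 1).map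
    (fun idx => if PySem.Set.contains keep idx then (1 : Int) else 0)

-- ===== PRECONDITION & SPEC =====
def Spec_transform_pointlist (list : List Int) (front_n : Int) (out : List Int) : Prop := out = transform_pointlist_alt list front_n
instance (list : List Int) (front_n : Int) (out : List Int) : Decidable (Spec_transform_pointlist list front_n out) := by unfold Spec_transform_pointlist; infer_instance

-- ===== CLAIM (what is proved, stated in full; the proofs are below) =====
def Claim_equal_transform_pointlist : Prop := ∀ (list : List Int) (front_n : Int), Dom_transform_pointlist list front_n → Spec_transform_pointlist list front_n (transform_pointlist list front_n)

-- ===== LEMMAS AND PROOFS =====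

-- reference function: mark the first k nonzero elements with 1
def markN (front : List Int) (k : Nat) : List Int :=
  match front, k with
  | [], _ => []
  | x :: xs, k =>
    if x ≠ 0 then
      (if 0 < k then 1 :: markN xs (k - 1) else 0 :: markN xs k)
    else 0 :: markN xs k

lemma foldA (front_n : Int) : ∀ (xs : List Int) (c cal : Int) (acc : List Int),
    (xs.foldl (fun (s : Int × List Int × Int) i =>
      let calculator := s.2.2 + 1
      if i ≠ 0 ∧ s.1 ≤ front_n then (s.1 + 1, s.2.1 ++ [(1 : Int)], calculator)
      else (s.1, s.2.1 ++ [(0 : Int)], calculator)) (c, acc, cal)).2.1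
    = acc ++ markN xs ((front_n + 1 - c).toNat) := by
  intro xs
  induction xs with
  | nil => intro c cal acc; simp [markN]
  | cons x xs ih =>
    intro c cal acc
    simp only [List.foldl_cons]
    by_cases hx : x ≠ 0 ∧ c ≤ front_n
    · have h1 : (front_n + 1 - (c + 1)).toNat = (front_n + 1 - c).toNat - 1 := by omega
      have h2 : 0 < (front_n + 1 - c).toNat := by omega
      simp only [hx, markN, ih]
      simp [hx.1, h2]
      congr 1
      omega
    · rw [if_neg hx]
      rw [ih]
      by_cases hx0 : x = 0
      · simp [markN, hx0]
      · have hc : ¬ c ≤ front_n := by tauto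
        have hk : (front_n + 1 - c).toNat = 0 := by omega
        simp [markN, hx0, hk]

-- indices (from start s) of the nonzero elements, as computed by B
def posOf (xs : List Int) (s : Int) : List Int :=
  ((PySem.List.enumerate xs s).filter (fun p => p.2 != 0)).map (fun p => p.1)

lemma posOf_nil (s : Int) : posOf [] s = [] := by
  simp [posOf, PySem.List.enumerate_nil]

lemma posOf_cons (x : Int) (xs : List Int) (s : Int) :
    posOf (x :: xs) s = if x ≠ 0 then s :: posOf xs (s + 1) else posOf xs (s + 1) := by
  by_cases hx : x = 0 <;> simp [posOf, PySem.List.enumerate_cons, hx]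

lemma posOf_lb : ∀ (xs : List Int) (s a : Int), a ∈ posOf xs s → s ≤ a := by
  intro xs
  induction xs with
  | nil => intro s a h; simp [posOf_nil] at h
  | cons x xs ih =>
    intro s a h
    rw [posOf_cons] at h
    by_cases hx : x = 0
    · simp [hx] at h
      have := ih (s + 1) a h
      omega
    · simp [hx] at h
      rcases h with h | h
      · omega
      · have := ih (s + 1) a h
        omega

lemma Bmain : ∀ (xs : List Int) (s : Int) (k : Nat),
    (PySem.List.pyRange s (s + xs.length) 1).map
      (fun idx => if idx ∈ (posOf xs s).take k then (1 : Int) else 0) = markN xs k := by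
  intro xs
  induction xs with
  | nil =>
    intro s k
    rw [PySem.List.pyRange_one_eq_nil (by simp)]
    simp [markN]
  | cons x xs ih =>
    intro s k
    have hlen : s + ((x :: xs).length : Int) = (s + 1) + (xs.length : Int) := by
      simp; omega
    rw [hlen, PySem.List.pyRange_one_cons (by omega)]
    rw [List.map_cons]
    by_cases hx : x = 0
    · -- head is 0; tail keeps the same take
      have hhead : s ∉ (posOf (x :: xs) s).take k := by
        intro hmem
        have hmem' : s ∈ posOf (x :: xs) s := List.mem_of_mem_take hmem
        rw [posOf_cons] at hmem'
        simp [hx] at hmem'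
        have := posOf_lb xs (s + 1) s hmem'
        omega
      rw [if_neg hhead]
      have htail : (PySem.List.pyRange (s + 1) (s + 1 + (xs.length : Int)) 1).map
          (fun idx => if idx ∈ (posOf (x :: xs) s).take k then (1 : Int) else 0)
          = (PySem.List.pyRange (s + 1) (s + 1 + (xs.length : Int)) 1).map
          (fun idx => if idx ∈ (posOf xs (s + 1)).take k then (1 : Int) else 0) := by
        apply List.map_congr_left
        intro idx _
        rw [posOf_cons]
        simp [hx]
      rw [htail, ih (s + 1) k]
      simp [markN, hx]
    · -- x ≠ 0
      rw [posOf_cons]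
      simp only [hx, ne_eq, not_false_eq_true, if_pos]
      match k with
      | 0 =>
        have h := ih (s + 1) 0
        simp only [List.take_zero, List.not_mem_nil, if_false] at h ⊢
        simp [markN, hx, h]
      | k' + 1 =>
        rw [List.take_succ_cons]
        simp only [List.mem_cons]
        simp only [true_or, if_true]
        have htail : (PySem.List.pyRange (s + 1) (s + 1 + (xs.length : Int)) 1).map
            (fun idx => if idx = s ∨ idx ∈ (posOf xs (s + 1)).take k' then (1 : Int) else 0)
            = (PySem.List.pyRange (s + 1) (s + 1 + (xs.length : Int)) 1).map
            (fun idx => if idx ∈ (posOf xs (s + 1)).take k' then (1 : Int) else 0) := by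
          apply List.map_congr_left
          intro idx hidx
          have hge : s + 1 ≤ idx := (PySem.List.mem_pyRange_one.mp hidx).1
          have hne : ¬ idx = s := by omega
          simp [hne]
        rw [htail, ih (s + 1) k']
        simp [markN, hx]

lemma alt_eq_markN (list : List Int) (front_n : Int) :
    transform_pointlist_alt list front_n = markN list ((front_n + 1).toNat) := by
  unfold transform_pointlist_alt
  have hmax : (0 : Int) ≤ max (front_n + 1) 0 := le_max_right _ _
  dsimp only
  simp only [PySem.List.slice_to _ hmax]
  have hfun : ∀ (P : List Int),
      (fun idx => if PySem.Set.contains (PySem.Set.ofList P) idx = true then (1 : Int) else 0)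
      = (fun idx => if idx ∈ P then (1 : Int) else 0) := by
    intro P
    funext idx
    by_cases h : idx ∈ P <;> simp [PySem.Set.mem_ofList, h]
  rw [hfun]
  have h0 : (list.length : Int) = 0 + (list.length : Int) := by omega
  rw [h0, show ((front_n + 1).toNat) = ((max (front_n + 1) 0).toNat) from by omega]
  exact Bmain list 0 ((max (front_n + 1) 0).toNat)

-- ===== VERDICT (by name: the statement is the Claim_ definition above) =====
theorem transform_pointlist_spec : Claim_equal_transform_pointlist := by
  intro list front_n _
  unfold Spec_transform_pointlist
  rw [alt_eq_markN]
  unfold transform_pointlist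
  rw [foldA front_n list 0 0 []]
  simp
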